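-- pv_equiv track=rewrite | github.com/dwaybright/g729a_python | src/basic_op.py | norm_s
-- ===== SOURCE A (Python) =====
-- MAX_INT_14 = 16384          # 0x00004000
--
-- def norm_s(var1: int) -> int:
--
--     if var1 == 0:
--         return 0
--     elif var1 == -1:
--         return 15
--
--     result = 0
--     test = var1
--     if test < 0:
--         test = ~test
--
--     while test < MAX_INT_14:
--         test = test << 1
--         result = result + 1
--
--     return result
-- ===== SOURCE B (Python) =====
-- def norm_s(var1: int) -> int:
--     if var1 == 0:
--         return 0
--     test = ~var1 if var1 < 0 else var1
--     return max(0, 15 - test.bit_length())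
-- ===== Notes on version B (the rewrite author's own statement) =====
-- stated objective: simpler
-- what changed: The shift-and-count while loop is replaced by a closed-form bit_length computation: max(0, 15 - test.bit_length()), which also subsumes A's special -1 case.
import Mathlib
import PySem

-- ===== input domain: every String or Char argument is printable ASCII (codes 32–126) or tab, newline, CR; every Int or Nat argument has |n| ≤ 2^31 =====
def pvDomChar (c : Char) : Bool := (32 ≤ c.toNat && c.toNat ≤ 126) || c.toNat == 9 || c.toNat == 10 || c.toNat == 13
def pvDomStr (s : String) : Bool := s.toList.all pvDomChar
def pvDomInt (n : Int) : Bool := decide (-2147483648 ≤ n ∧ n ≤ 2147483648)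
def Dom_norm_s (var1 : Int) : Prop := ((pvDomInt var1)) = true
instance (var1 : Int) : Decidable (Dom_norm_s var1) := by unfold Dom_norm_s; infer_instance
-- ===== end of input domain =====

-- B replaces A's shift-and-count loop by the closed form max(0, 15 - test.bit_length()) (simpler).

-- ===== PORT A =====
-- the while loop: `while test < 16384: test <<= 1; result += 1`.
-- The guard 0 < test only makes the recursion total: on every input A reaches the
-- loop with (test = var1 or test = ~var1) ≥ 1, where the guard is true.
def normLoopA (test result : Int) : Int :=
  if h : 0 < test ∧ test < 16384 then normLoopA (test * 2) (result + 1) else result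
termination_by (16384 - test).toNat
decreasing_by
  have := h.1; have := h.2
  omega

def norm_s (var1 : Int) : Int :=
  if var1 = 0 then 0
  else if var1 = -1 then 15
  else
    let test := var1
    let test := if test < 0 then -test - 1 else test   -- test = ~test
    normLoopA test 0

-- ===== PORT B =====
-- Python's int.bit_length for the nonnegative ints B applies it to
def bitLengthB (n : Int) : Int :=
  if n ≤ 0 then 0 else (Nat.log2 n.toNat : Int) + 1

def norm_s_alt (var1 : Int) : Int :=
  if var1 = 0 then 0
  else
    let test := if var1 < 0 then -var1 - 1 else var1   -- ~var1 if var1 < 0 else var1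
    max 0 (15 - bitLengthB test)

-- ===== PRECONDITION & SPEC =====
def Spec_norm_s (var1 : Int) (out : Int) : Prop := out = norm_s_alt var1
instance (var1 : Int) (out : Int) : Decidable (Spec_norm_s var1 out) := by unfold Spec_norm_s; infer_instance

-- ===== CLAIM (what is proved, stated in full; the proofs are below) =====
def Claim_equal_norm_s : Prop := ∀ (var1 : Int), Dom_norm_s var1 → Spec_norm_s var1 (norm_s var1)

-- ===== LEMMAS AND PROOFS =====

theorem log2_two_mul (n : ℕ) (h : 1 ≤ n) : Nat.log2 (2 * n) = Nat.log2 n + 1 := by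
  rw [Nat.log2_eq_log_two, Nat.log2_eq_log_two, mul_comm,
    Nat.log_mul_base (by norm_num) (by omega)]

theorem log2_ge_of_le {k n : ℕ} (h : 2 ^ k ≤ n) : k ≤ Nat.log2 n := by
  rw [Nat.log2_eq_log_two]
  exact Nat.le_log_of_pow_le (by norm_num) h

theorem log2_lt_of_lt {k n : ℕ} (hn : 1 ≤ n) (h : n < 2 ^ k) : Nat.log2 n < k := by
  rw [Nat.log2_eq_log_two]
  exact Nat.log_lt_of_lt_pow (by omega) h

theorem normLoopA_eq (fuel : ℕ) (test r : Int) (ht : 1 ≤ test)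
    (hf : (16384 - test).toNat ≤ fuel) :
    normLoopA test r = r + max 0 (15 - bitLengthB test) := by
  induction fuel generalizing test r with
  | zero =>
    have hge : (16384 : Int) ≤ test := by omega
    rw [normLoopA]
    have : ¬ (0 < test ∧ test < 16384) := by omega
    rw [dif_neg this]
    have hlog : 14 ≤ Nat.log2 test.toNat := by
      apply log2_ge_of_le
      have : (16384 : ℕ) ≤ test.toNat := by omega
      simpa using this
    unfold bitLengthB
    rw [if_neg (by omega)]
    omega
  | succ m ih =>
    by_cases hlt : test < 16384
    · rw [normLoopA]
      rw [dif_pos ⟨by omega, hlt⟩]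
      rw [ih (test * 2) (r + 1) (by omega) (by omega)]
      have hbl2 : bitLengthB (test * 2) = bitLengthB test + 1 := by
        unfold bitLengthB
        rw [if_neg (by omega), if_neg (by omega)]
        have h2 : (test * 2).toNat = 2 * test.toNat := by omega
        rw [h2, log2_two_mul test.toNat (by omega)]
        push_cast; ring
      have hble : bitLengthB test ≤ 14 := by
        unfold bitLengthB
        rw [if_neg (by omega)]
        have hlog : Nat.log2 test.toNat < 14 := by
          apply log2_lt_of_lt (by omega)
          have : test.toNat < 16384 := by omega
          simpa using this
        omega
      rw [hbl2]
      omega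
    · rw [normLoopA]
      have hno : ¬ (0 < test ∧ test < 16384) := by omega
      rw [dif_neg hno]
      have hlog : 14 ≤ Nat.log2 test.toNat := by
        apply log2_ge_of_le
        have : (16384 : ℕ) ≤ test.toNat := by omega
        simpa using this
      unfold bitLengthB
      rw [if_neg (by omega)]
      omega

-- ===== VERDICT (by name: the statement is the Claim_ definition above) =====
theorem norm_s_spec : Claim_equal_norm_s := by
  intro var1 _
  unfold Spec_norm_s norm_s norm_s_alt
  by_cases h0 : var1 = 0
  · simp [h0]
  · rw [if_neg h0, if_neg h0]
    by_cases h1 : var1 = -1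
    · subst h1
      norm_num [bitLengthB, Nat.log2]
    · rw [if_neg h1]
      simp only []
      set test := if var1 < 0 then -var1 - 1 else var1 with hdef
      have ht : 1 ≤ test := by
        rw [hdef]; split_ifs with hneg <;> omega
      rw [normLoopA_eq (16384 - test).toNat test 0 ht le_rfl]
      omega
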